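-- pv_equiv track=rewrite | github.com/gspell/CongressionalTweets | Source/training/model_analysis.py | get_party_class_counts
-- ===== SOURCE A (Python) =====
-- def get_party_class_counts(leg_idxs, leg_dict, labels):
--     # Note data is a tuple of form (leg_idx, day_idx, label)
--     party_keys = ['Republicans', 'Democrats']
--     class_keys = ['Negatives', 'Neutrals', 'Positives']
--     # Initialize count dictionary using dict-comprehension
--     party_class_counts = {key: {key_2: 0 for key_2 in class_keys} for
--                           key in party_keys}
--     for i in range(len(leg_idxs)):
--         leg_idx, label = leg_idxs[i], labels[i]
--         leg = leg_dict[int(leg_idx)]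
--         if leg["party"]=="R":
--             if label==0:
--                 party_class_counts['Republicans']['Negatives'] += 1
--             elif label==1:
--                 party_class_counts['Republicans']['Neutrals'] += 1
--             elif label==2:
--                 party_class_counts['Republicans']['Positives'] += 1
--             else:
--                 raise ValueError('Label is not 0, 1, or 2')
--         else:
--             if label==0:
--                 party_class_counts['Democrats']['Negatives'] += 1
--             elif label==1:
--                 party_class_counts['Democrats']['Neutrals'] +=1
--             elif label==2:
--                 party_class_counts['Democrats']['Positives'] +=1
--             else:
--                 raise ValueError("Label is not 0, 1, or 2")
--     return party_class_counts
-- ===== SOURCE B (Python) =====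
-- def get_party_class_counts(leg_idxs, leg_dict, labels):
--     # Divide-and-conquer: count vectors for halves are merged by elementwise addition.
--     def counts(lo, hi):
--         # 6-vector [R-neg, R-neu, R-pos, D-neg, D-neu, D-pos] for the slice [lo, hi)
--         if hi - lo == 0:
--             return [0, 0, 0, 0, 0, 0]
--         if hi - lo == 1:
--             label = labels[lo]
--             if label != 0 and label != 1 and label != 2:
--                 raise ValueError('Label is not 0, 1, or 2')
--             base = 0 if leg_dict[int(leg_idxs[lo])]["party"] == "R" else 3
--             v = [0, 0, 0, 0, 0, 0]
--             v[base + label] = 1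
--             return v
--         mid = (lo + hi) // 2
--         return [x + y for x, y in zip(counts(lo, mid), counts(mid, hi))]
--     v = counts(0, len(leg_idxs))
--     return {'Republicans': {'Negatives': v[0], 'Neutrals': v[1], 'Positives': v[2]},
--             'Democrats':   {'Negatives': v[3], 'Neutrals': v[4], 'Positives': v[5]}}
-- ===== Notes on version B (the rewrite author's own statement) =====
-- stated objective: alternative
-- what changed: Replaces A's left-to-right pass that increments a nested dict through if/elif cascades with a divide-and-conquer recursion: the index range is split in half, each half yields a flat 6-count vector (a singleton slice yields a unit vector), halves are merged by elementwise addition, and the vector is reshaped into the nested dict at the end.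
import Mathlib
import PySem

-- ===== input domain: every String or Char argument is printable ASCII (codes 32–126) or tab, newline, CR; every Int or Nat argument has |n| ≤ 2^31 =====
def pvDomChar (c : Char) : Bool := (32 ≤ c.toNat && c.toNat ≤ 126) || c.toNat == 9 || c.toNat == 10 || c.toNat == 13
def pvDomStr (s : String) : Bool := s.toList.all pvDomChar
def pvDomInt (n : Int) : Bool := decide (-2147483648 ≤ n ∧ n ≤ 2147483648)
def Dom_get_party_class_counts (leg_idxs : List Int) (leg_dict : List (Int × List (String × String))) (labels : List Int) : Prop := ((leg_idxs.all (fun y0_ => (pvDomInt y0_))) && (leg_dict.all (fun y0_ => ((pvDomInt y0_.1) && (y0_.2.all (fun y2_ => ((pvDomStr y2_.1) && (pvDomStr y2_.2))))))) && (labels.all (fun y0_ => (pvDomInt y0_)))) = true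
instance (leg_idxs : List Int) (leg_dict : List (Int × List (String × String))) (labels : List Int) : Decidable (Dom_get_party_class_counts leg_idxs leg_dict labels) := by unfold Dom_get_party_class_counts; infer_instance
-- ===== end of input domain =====

-- B replaces A's single left-to-right pass incrementing a nested dict by a divide-and-conquer
-- recursion over the index range that merges flat 6-count vectors; alternative decomposition, not faster.

-- ===== PORT A =====
-- {key: {key_2: 0 for key_2 in class_keys} for key in party_keys}
def pccInit : PySem.Dict String (PySem.Dict String Int) :=
  ["Republicans", "Democrats"].foldl
    (fun d key => d.insert key
      (["Negatives", "Neutrals", "Positives"].foldl (fun d2 k2 => d2.insert k2 0) PySem.Dict.empty))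
    PySem.Dict.empty

-- loop body; oa/ob are leg_idxs[i]/labels[i]; none = the Python raised (IndexError / KeyError / ValueError).
-- party_class_counts[k][k2] += 1 is Dict.modify (both keys always present, so the default is never read).
def pccBody (leg_dict : List (Int × List (String × String)))
    (st : Option (PySem.Dict String (PySem.Dict String Int))) (oa ob : Option Int) :
    Option (PySem.Dict String (PySem.Dict String Int)) :=
  st.bind fun pcc =>
    match oa, ob with
    | some leg_idx, some label =>
      match (PySem.Dict.mk leg_dict).get? leg_idx with
      | none => none
      | some leg =>
        match (PySem.Dict.mk leg).get? "party" with
        | none => none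
        | some p =>
          if p == "R" then
            if label == 0 then some (pcc.modify "Republicans" PySem.Dict.empty (fun d => d.modify "Negatives" 0 (· + 1)))
            else if label == 1 then some (pcc.modify "Republicans" PySem.Dict.empty (fun d => d.modify "Neutrals" 0 (· + 1)))
            else if label == 2 then some (pcc.modify "Republicans" PySem.Dict.empty (fun d => d.modify "Positives" 0 (· + 1)))
            else none
          else
            if label == 0 then some (pcc.modify "Democrats" PySem.Dict.empty (fun d => d.modify "Negatives" 0 (· + 1)))
            else if label == 1 then some (pcc.modify "Democrats" PySem.Dict.empty (fun d => d.modify "Neutrals" 0 (· + 1)))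
            else if label == 2 then some (pcc.modify "Democrats" PySem.Dict.empty (fun d => d.modify "Positives" 0 (· + 1)))
            else none
    | _, _ => none

def get_party_class_counts (leg_idxs : List Int) (leg_dict : List (Int × List (String × String))) (labels : List Int) : List (String × List (String × Int)) :=
  match (PySem.List.pyRange 0 (leg_idxs.length : Int) 1).foldl
      (fun st i => pccBody leg_dict st (PySem.List.pyGet? leg_idxs i) (PySem.List.pyGet? labels i))
      (some pccInit) with
  | some pcc => pcc.items.map (fun kv => (kv.1, kv.2.items))
  | none => []   -- the Python raised here; such inputs are outside Pre_

-- ===== PORT B =====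
-- the hi - lo == 1 leaf of Source B's counts; none = Source B raised (IndexError / ValueError / KeyError)
def altLeaf (leg_idxs : List Int) (leg_dict : List (Int × List (String × String))) (labels : List Int) (lo : Nat) : Option (List Int) :=
  match PySem.List.pyGet? labels (lo : Int) with
  | none => none
  | some label =>
    if label ≠ 0 ∧ label ≠ 1 ∧ label ≠ 2 then none
    else
      match PySem.List.pyGet? leg_idxs (lo : Int) with
      | none => none
      | some li =>
        match (PySem.Dict.mk leg_dict).get? li with
        | none => none
        | some leg =>
          match (PySem.Dict.mk leg).get? "party" with
          | none => none
          | some pp =>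
            let base : Nat := if pp == "R" then 0 else 3
            -- v[base + label] = 1; label ∈ {0,1,2} here, so toNat is exact
            some (([0, 0, 0, 0, 0, 0] : List Int).set (base + label.toNat) 1)

-- Source B's counts(lo, hi): divide-and-conquer over the index range.
-- fuel only makes the recursion structural (fuel ≥ hi - lo at every call, so the 'none' at fuel 0 is never reached).
def altCounts (leg_idxs : List Int) (leg_dict : List (Int × List (String × String))) (labels : List Int) (fuel lo hi : Nat) : Option (List Int) :=
  if hi - lo = 0 then some [0, 0, 0, 0, 0, 0]
  else if hi - lo = 1 then altLeaf leg_idxs leg_dict labels lo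
  else
    match fuel with
    | 0 => none
    | fuel + 1 =>
      -- mid = (lo + hi) // 2, inlined
      match altCounts leg_idxs leg_dict labels fuel lo ((lo + hi) / 2), altCounts leg_idxs leg_dict labels fuel ((lo + hi) / 2) hi with
      | some l, some r => some (List.zipWith (· + ·) l r)
      | _, _ => none

def get_party_class_counts_alt (leg_idxs : List Int) (leg_dict : List (Int × List (String × String))) (labels : List Int) : List (String × List (String × Int)) :=
  match altCounts leg_idxs leg_dict labels leg_idxs.length 0 leg_idxs.length with
  | none => []   -- Source B raised here; such inputs are outside Pre_
  | some v =>
    [("Republicans", [("Negatives", PySem.List.pyGetD v 0 0), ("Neutrals", PySem.List.pyGetD v 1 0), ("Positives", PySem.List.pyGetD v 2 0)]),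
     ("Democrats",   [("Negatives", PySem.List.pyGetD v 3 0), ("Neutrals", PySem.List.pyGetD v 4 0), ("Positives", PySem.List.pyGetD v 5 0)])]

-- ===== PRECONDITION & SPEC =====
-- Pre_ excludes exactly the inputs on which A raises: labels shorter than leg_idxs (IndexError),
-- a leg_idx or "party" key missing from the dicts (KeyError), or a label outside {0,1,2} (ValueError).
def Pre_get_party_class_counts (leg_idxs : List Int) (leg_dict : List (Int × List (String × String))) (labels : List Int) : Prop :=
  leg_idxs.length ≤ labels.length ∧
  ∀ p ∈ leg_idxs.zip labels,
    (p.2 = 0 ∨ p.2 = 1 ∨ p.2 = 2) ∧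
    (((PySem.Dict.mk leg_dict).get? p.1).bind (fun leg => (PySem.Dict.mk leg).get? "party")).isSome = true
instance (leg_idxs : List Int) (leg_dict : List (Int × List (String × String))) (labels : List Int) : Decidable (Pre_get_party_class_counts leg_idxs leg_dict labels) := by unfold Pre_get_party_class_counts; infer_instance

def pvWitness_get_party_class_counts : List Int × (List (Int × List (String × String))) × List Int :=
  ([0, 1, 0], [(0, [("party", "R")]), (1, [("party", "D")])], [0, 2, 2])

def Spec_get_party_class_counts (leg_idxs : List Int) (leg_dict : List (Int × List (String × String))) (labels : List Int) (out : List (String × List (String × Int))) : Prop := out = get_party_class_counts_alt leg_idxs leg_dict labels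
instance (leg_idxs : List Int) (leg_dict : List (Int × List (String × String))) (labels : List Int) (out : List (String × List (String × Int))) : Decidable (Spec_get_party_class_counts leg_idxs leg_dict labels out) := by unfold Spec_get_party_class_counts; infer_instance

-- ===== CLAIM (what is proved, stated in full; the proofs are below) =====
def Claim_equal_get_party_class_counts : Prop := ∀ (leg_idxs : List Int) (leg_dict : List (Int × List (String × String))) (labels : List Int), Dom_get_party_class_counts leg_idxs leg_dict labels → Pre_get_party_class_counts leg_idxs leg_dict labels → Spec_get_party_class_counts leg_idxs leg_dict labels (get_party_class_counts leg_idxs leg_dict labels)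

-- ===== LEMMAS AND PROOFS =====

-- one (leg_idx, label) element is processed without raising (per-element part of Pre_)
def Valid_gpcc (leg_dict : List (Int × List (String × String))) (p : Int × Int) : Prop :=
  (p.2 = 0 ∨ p.2 = 1 ∨ p.2 = 2) ∧
  (((PySem.Dict.mk leg_dict).get? p.1).bind (fun leg => (PySem.Dict.mk leg).get? "party")).isSome = true

def partyName (leg_dict : List (Int × List (String × String))) (p : Int × Int) : String :=
  if (((PySem.Dict.mk leg_dict).get? p.1).bind (fun leg => (PySem.Dict.mk leg).get? "party")).getD "" == "R"
  then "Republicans" else "Democrats"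

def buildPairs (leg_dict : List (Int × List (String × String))) (l : List (Int × Int)) : List (String × Int) :=
  l.map (fun p => (partyName leg_dict p, p.2))

-- the nested dict A maintains, expressed through counts over the flat (party, label) list
def stA (ps : List (String × Int)) : PySem.Dict String (PySem.Dict String Int) :=
  PySem.Dict.mk
    [("Republicans", PySem.Dict.mk
        [("Negatives", (ps.count ("Republicans", 0) : Int)),
         ("Neutrals",  (ps.count ("Republicans", 1) : Int)),
         ("Positives", (ps.count ("Republicans", 2) : Int))]),
     ("Democrats", PySem.Dict.mk
        [("Negatives", (ps.count ("Democrats", 0) : Int)),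
         ("Neutrals",  (ps.count ("Democrats", 1) : Int)),
         ("Positives", (ps.count ("Democrats", 2) : Int))])]

-- the flat 6-vector B maintains, over the same flat list
def cvec (ps : List (String × Int)) : List Int :=
  [(ps.count ("Republicans", 0) : Int), (ps.count ("Republicans", 1) : Int), (ps.count ("Republicans", 2) : Int),
   (ps.count ("Democrats", 0) : Int), (ps.count ("Democrats", 1) : Int), (ps.count ("Democrats", 2) : Int)]

lemma stA_nil : stA [] = pccInit := by decide

lemma stA_snoc (ps : List (String × Int)) (P C : String) (c : Int)
    (h : (P = "Republicans" ∨ P = "Democrats") ∧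
         ((C = "Negatives" ∧ c = 0) ∨ (C = "Neutrals" ∧ c = 1) ∨ (C = "Positives" ∧ c = 2))) :
    (stA ps).modify P PySem.Dict.empty (fun d => d.modify C 0 (· + 1)) = stA (ps ++ [(P, c)]) := by
  obtain ⟨hP, hC⟩ := h
  rcases hP with hP | hP <;> rcases hC with ⟨hC, hc⟩ | ⟨hC, hc⟩ | ⟨hC, hc⟩ <;>
    subst hP <;> subst hC <;> subst hc <;>
    simp [stA, PySem.Dict.modify, PySem.Dict.get?, PySem.Dict.getD, PySem.Dict.insert,
      PySem.Dict.contains, PySem.Dict.empty, List.count_append]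

lemma foldl_pyRange_zip {α β γ : Type} (g : γ → Option α → Option β → γ)
    (xs : List α) (ys : List β) (n : Nat) (hx : n ≤ xs.length) (hy : n ≤ ys.length) (s : γ) :
    (PySem.List.pyRange 0 (n : Int) 1).foldl
        (fun st i => g st (PySem.List.pyGet? xs i) (PySem.List.pyGet? ys i)) s
      = ((xs.zip ys).take n).foldl (fun st p => g st (some p.1) (some p.2)) s := by
  induction n generalizing s with
  | zero => simp
  | succ n ih =>
    have h1 : ((n + 1 : Nat) : Int) = (n : Int) + 1 := by push_cast; ring
    have hz : n < (xs.zip ys).length := by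
      simp only [List.length_zip]; omega
    rw [h1, PySem.List.pyRange_one_succ_right (by positivity), List.foldl_append,
      ih (by omega) (by omega), List.take_add_one, List.getElem?_eq_getElem hz]
    simp [List.getElem_zip, PySem.List.pyGet?_natCast,
      List.getElem?_eq_getElem (show n < xs.length by omega),
      List.getElem?_eq_getElem (show n < ys.length by omega)]

-- A's fold computes stA of the flat pair list
lemma main_fold_A (leg_dict : List (Int × List (String × String))) (l : List (Int × Int))
    (h : ∀ p ∈ l, Valid_gpcc leg_dict p) (ps : List (String × Int)) :
    l.foldl (fun st p => pccBody leg_dict st (some p.1) (some p.2)) (some (stA ps))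
        = some (stA (ps ++ buildPairs leg_dict l)) := by
  induction l generalizing ps with
  | nil => simp [buildPairs]
  | cons p l ih =>
    obtain ⟨hlab, hsome⟩ := h p (by simp)
    obtain ⟨leg, hleg⟩ : ∃ leg, (PySem.Dict.mk leg_dict).get? p.1 = some leg := by
      cases hget : (PySem.Dict.mk leg_dict).get? p.1 with
      | none => rw [hget] at hsome; simp at hsome
      | some leg => exact ⟨leg, rfl⟩
    obtain ⟨pp, hpp⟩ : ∃ pp, (PySem.Dict.mk leg).get? "party" = some pp := by
      rw [hleg] at hsome
      simp only [Option.bind_some] at hsome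
      cases hget : (PySem.Dict.mk leg).get? "party" with
      | none => rw [hget] at hsome; simp at hsome
      | some pp => exact ⟨pp, rfl⟩
    have hparty : partyName leg_dict p = if pp == "R" then "Republicans" else "Democrats" := by
      simp [partyName, hleg, hpp]
    have hA : pccBody leg_dict (some (stA ps)) (some p.1) (some p.2)
        = some (stA (ps ++ [(partyName leg_dict p, p.2)])) := by
      simp only [pccBody, Option.bind_some, hleg, hpp, hparty]
      by_cases hR : pp == "R" <;>
        rcases hlab with hc | hc | hc <;>
        simp only [hR, hc] <;> simp <;>
        exact stA_snoc ps _ _ _ (by simp)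
    have hbuild : buildPairs leg_dict (p :: l) = (partyName leg_dict p, p.2) :: buildPairs leg_dict l := by
      simp [buildPairs]
    rw [List.foldl_cons, hA, ih (fun q hq => h q (by simp [hq])), hbuild]
    simp

lemma cvec_append (a b : List (String × Int)) :
    cvec (a ++ b) = List.zipWith (· + ·) (cvec a) (cvec b) := by
  simp [cvec, List.count_append]

-- B's leaf on a valid element is cvec of the singleton pair
lemma altLeaf_eq (leg_idxs : List Int) (leg_dict : List (Int × List (String × String))) (labels : List Int)
    (lo : Nat) (hx : lo < leg_idxs.length) (hy : lo < labels.length)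
    (hv : Valid_gpcc leg_dict (leg_idxs[lo], labels[lo])) :
    altLeaf leg_idxs leg_dict labels lo
      = some (cvec [(partyName leg_dict (leg_idxs[lo], labels[lo]), labels[lo])]) := by
  obtain ⟨hlab, hsome⟩ := hv
  simp only at hlab hsome
  obtain ⟨leg, hleg⟩ : ∃ leg, (PySem.Dict.mk leg_dict).get? leg_idxs[lo] = some leg := by
    cases hget : (PySem.Dict.mk leg_dict).get? leg_idxs[lo] with
    | none => rw [hget] at hsome; simp at hsome
    | some leg => exact ⟨leg, rfl⟩
  obtain ⟨pp, hpp⟩ : ∃ pp, (PySem.Dict.mk leg).get? "party" = some pp := by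
    rw [hleg] at hsome
    simp only [Option.bind_some] at hsome
    cases hget : (PySem.Dict.mk leg).get? "party" with
    | none => rw [hget] at hsome; simp at hsome
    | some pp => exact ⟨pp, rfl⟩
  have hparty : partyName leg_dict (leg_idxs[lo], labels[lo])
      = if pp == "R" then "Republicans" else "Democrats" := by
    simp [partyName, hleg, hpp]
  simp only [altLeaf, PySem.List.pyGet?_natCast, List.getElem?_eq_getElem hx,
    List.getElem?_eq_getElem hy, hleg, hpp, hparty]
  by_cases hR : pp == "R" <;>
    rcases hlab with hc | hc | hc <;>
    simp [hR, hc, cvec]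

-- B's divide-and-conquer computes cvec of the flat pair list of the slice
lemma altCounts_eq (leg_idxs : List Int) (leg_dict : List (Int × List (String × String))) (labels : List Int)
    (fuel lo hi : Nat) (hf : hi - lo ≤ fuel) (hlo : lo ≤ hi) (hx : hi ≤ leg_idxs.length) (hy : hi ≤ labels.length)
    (hv : ∀ p ∈ leg_idxs.zip labels, Valid_gpcc leg_dict p) :
    altCounts leg_idxs leg_dict labels fuel lo hi
      = some (cvec (buildPairs leg_dict (((leg_idxs.zip labels).drop lo).take (hi - lo)))) := by
  induction fuel generalizing lo hi with
  | zero =>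
    have hk : hi - lo = 0 := by omega
    rw [altCounts, if_pos hk, hk]
    simp [buildPairs, cvec]
  | succ fuel ih =>
    by_cases h0 : hi - lo = 0
    · rw [altCounts, if_pos h0, h0]
      simp [buildPairs, cvec]
    by_cases h1 : hi - lo = 1
    · have hx' : lo < leg_idxs.length := by omega
      have hy' : lo < labels.length := by omega
      have hz : lo < (leg_idxs.zip labels).length := by simp [List.length_zip]; omega
      have hslice : ((leg_idxs.zip labels).drop lo).take (hi - lo) = [(leg_idxs[lo], labels[lo])] := by
        rw [h1, List.take_one, List.head?_drop, List.getElem?_eq_getElem hz]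
        simp [List.getElem_zip]
      rw [altCounts, if_neg h0, if_pos h1, hslice,
        altLeaf_eq leg_idxs leg_dict labels lo hx' hy'
          (hv _ (by rw [← List.getElem_zip]; exact List.getElem_mem hz))]
      simp [buildPairs]
    · have hmid1 : lo < (lo + hi) / 2 := by omega
      have hmid2 : (lo + hi) / 2 < hi := by omega
      rw [altCounts, if_neg h0, if_neg h1]
      rw [ih lo ((lo + hi) / 2) (by omega) (by omega) (by omega) (by omega),
          ih ((lo + hi) / 2) hi (by omega) (by omega) hx hy]
      have hsplit : ((leg_idxs.zip labels).drop lo).take (hi - lo)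
          = (((leg_idxs.zip labels).drop lo).take ((lo + hi) / 2 - lo))
            ++ (((leg_idxs.zip labels).drop ((lo + hi) / 2)).take (hi - (lo + hi) / 2)) := by
        have h : hi - lo = ((lo + hi) / 2 - lo) + (hi - (lo + hi) / 2) := by omega
        rw [h, List.take_add, List.drop_drop]
        congr 3
        omega
      rw [hsplit]
      simp only [buildPairs, List.map_append, cvec_append]

-- ===== VERDICT (by name: the statement is the Claim_ definition above) =====
theorem get_party_class_counts_spec : Claim_equal_get_party_class_counts := by
  intro leg_idxs leg_dict labels _ hpre
  obtain ⟨hlen, hval⟩ := hpre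
  unfold Spec_get_party_class_counts get_party_class_counts get_party_class_counts_alt
  have htake : (leg_idxs.zip labels).take leg_idxs.length = leg_idxs.zip labels := by
    apply List.take_of_length_le; simp [List.length_zip]
  rw [foldl_pyRange_zip (pccBody leg_dict) leg_idxs labels leg_idxs.length le_rfl hlen, htake]
  rw [← stA_nil, main_fold_A leg_dict (leg_idxs.zip labels) hval []]
  have hdrop : ((leg_idxs.zip labels).drop 0).take (leg_idxs.length - 0) = leg_idxs.zip labels := by
    simp [htake]
  rw [altCounts_eq leg_idxs leg_dict labels leg_idxs.length 0 leg_idxs.length (by omega) (by omega) le_rfl hlen hval, hdrop]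
  simp only [List.nil_append]
  simp [stA, cvec, PySem.List.pyGetD]
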